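-- pv_equiv track=rewrite | github.com/alstn2468/BaekJoon_Online_Judge-1000-1100- | 11700~11799/11778.py | get_gcd_of_fibonacci
-- ===== SOURCE A (Python) =====
-- mod = 1_000_000_007
--
-- def get_gcd_of_fibonacci(n, m):
--     gcd_val = get_gcd(n, m)
--
--     ans = [[1, 0], [1, 0]]
--     a = [[1, 1], [1, 0]]
--
--     while gcd_val > 0:
--         if gcd_val % 2 == 1:
--             ans = [
--                 [(ans[0][0] * a[0][0] + ans[0][1] * a[1][0]) % mod,
--                  (ans[0][0] * a[0][1] + ans[0][1] * a[1][1]) % mod],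
--                 [(ans[1][0] * a[0][0] + ans[1][1] * a[1][0]) % mod,
--                  (ans[1][0] * a[0][1] + ans[1][1] * a[1][1]) % mod]
--             ]
--
--         a = [
--             [(a[0][0] * a[0][0] + a[0][1] * a[1][0]) % mod,
--              (a[0][0] * a[0][1] + a[0][1] * a[1][1]) % mod],
--             [(a[1][0] * a[0][0] + a[1][1] * a[1][0]) % mod,
--              (a[1][0] * a[0][1]+a[1][1] * a[1][1]) % mod]
--         ]
--
--         gcd_val //= 2
--
--     return ans[0][1] % mod
--
-- def get_gcd(n1, n2):
--     while n2:
--         n1, n2 = n2, n1 % n2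
--
--     return n1
-- ===== SOURCE B (Python) =====
-- mod = 1_000_000_007
--
--
-- def get_gcd(n1, n2):
--     while n2:
--         n1, n2 = n2, n1 % n2
--
--     return n1
--
--
-- def _fib_pair(k):
--     # (F(k) % mod, F(k+1) % mod) by fast doubling.
--     if k == 0:
--         return (0, 1)
--     a, b = _fib_pair(k // 2)
--     c = a * (2 * b - a) % mod
--     d = (a * a + b * b) % mod
--     if k % 2 == 0:
--         return (c, d)
--     return (d, (c + d) % mod)
--
--
-- def get_gcd_of_fibonacci(n, m):
--     g = get_gcd(n, m)
--     if g <= 0: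
--         return 0
--     return _fib_pair(g)[0]
-- ===== Notes on version B (the rewrite author's own statement) =====
-- stated objective: alternative
-- what changed: Replaces the 2x2-matrix binary exponentiation loop with a recursive fast-doubling routine that maintains only the scalar pair (F(k) mod p, F(k+1) mod p); the Euclidean gcd helper is kept unchanged.
import Mathlib
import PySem

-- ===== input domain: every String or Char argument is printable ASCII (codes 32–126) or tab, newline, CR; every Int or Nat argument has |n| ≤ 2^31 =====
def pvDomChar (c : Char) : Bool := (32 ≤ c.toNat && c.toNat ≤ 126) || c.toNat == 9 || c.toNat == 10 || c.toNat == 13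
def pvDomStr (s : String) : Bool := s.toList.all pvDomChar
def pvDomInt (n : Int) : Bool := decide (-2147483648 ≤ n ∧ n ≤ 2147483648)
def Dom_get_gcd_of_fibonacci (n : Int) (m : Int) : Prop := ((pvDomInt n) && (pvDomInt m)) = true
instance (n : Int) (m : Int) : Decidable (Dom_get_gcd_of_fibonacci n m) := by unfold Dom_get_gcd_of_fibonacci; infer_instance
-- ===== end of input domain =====

-- B replaces A's 2x2-matrix binary exponentiation with a fast-doubling recursion on the
-- scalar pair (F(k) mod p, F(k+1) mod p); same gcd helper, same results (alternative algorithm).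

def pvMOD : Int := 1000000007

-- shared helper: literal port of get_gcd (Python while-loop as recursion on |n2|)
theorem pvGcd_dec (n1 n2 : Int) (h : ¬ n2 = 0) :
    (PySem.Int.mod n1 n2).natAbs < n2.natAbs := by
  rcases lt_or_gt_of_ne h with hneg | hpos
  · have := PySem.Int.mod_neg_bounds (a := n1) hneg
    omega
  · have h1 := PySem.Int.mod_nonneg (a := n1) hpos
    have h2 := PySem.Int.mod_lt (a := n1) hpos
    omega

def pvGetGcd (n1 n2 : Int) : Int :=
  if h : n2 = 0 then n1
  else pvGetGcd n2 (PySem.Int.mod n1 n2)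
termination_by n2.natAbs
decreasing_by exact pvGcd_dec n1 n2 h

-- ===== PORT A =====
-- the while-loop of A: state (ans, a, gcd_val), matrices as pairs of pairs
def pvFibLoop (ans a : (Int × Int) × (Int × Int)) (g : Int) :
    (Int × Int) × (Int × Int) :=
  if _hg : 0 < g then
    pvFibLoop
      (if PySem.Int.mod g 2 = 1 then
        ((PySem.Int.mod (ans.1.1 * a.1.1 + ans.1.2 * a.2.1) pvMOD,
          PySem.Int.mod (ans.1.1 * a.1.2 + ans.1.2 * a.2.2) pvMOD),
         (PySem.Int.mod (ans.2.1 * a.1.1 + ans.2.2 * a.2.1) pvMOD,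
          PySem.Int.mod (ans.2.1 * a.1.2 + ans.2.2 * a.2.2) pvMOD))
      else ans)
      ((PySem.Int.mod (a.1.1 * a.1.1 + a.1.2 * a.2.1) pvMOD,
        PySem.Int.mod (a.1.1 * a.1.2 + a.1.2 * a.2.2) pvMOD),
       (PySem.Int.mod (a.2.1 * a.1.1 + a.2.2 * a.2.1) pvMOD,
        PySem.Int.mod (a.2.1 * a.1.2 + a.2.2 * a.2.2) pvMOD))
      (PySem.Int.floordiv g 2)
  else ans
termination_by g.toNat
decreasing_by
  rw [PySem.Int.floordiv_eq_ediv_of_pos (by norm_num)]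
  omega

def get_gcd_of_fibonacci (n : Int) (m : Int) : Int :=
  let gcd_val := pvGetGcd n m
  let ans : (Int × Int) × (Int × Int) := ((1, 0), (1, 0))
  let a : (Int × Int) × (Int × Int) := ((1, 1), (1, 0))
  PySem.Int.mod (pvFibLoop ans a gcd_val).1.2 pvMOD

-- ===== PORT B =====
-- fast doubling: pvFibPair k = (F(k) % mod, F(k+1) % mod)
def pvFibPair (k : Nat) : Int × Int :=
  if hk : k = 0 then (0, 1)
  else
    let p := pvFibPair (k / 2)
    let a := p.1
    let b := p.2
    let c := PySem.Int.mod (a * (2 * b - a)) pvMOD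
    let d := PySem.Int.mod (a * a + b * b) pvMOD
    if k % 2 = 0 then (c, d) else (d, PySem.Int.mod (c + d) pvMOD)
termination_by k
decreasing_by exact Nat.div_lt_self (Nat.pos_of_ne_zero hk) (by norm_num)

def get_gcd_of_fibonacci_alt (n : Int) (m : Int) : Int :=
  let g := pvGetGcd n m
  if g ≤ 0 then 0 else (pvFibPair g.toNat).1

-- ===== PRECONDITION & SPEC =====
def Spec_get_gcd_of_fibonacci (n : Int) (m : Int) (out : Int) : Prop := out = get_gcd_of_fibonacci_alt n m
instance (n : Int) (m : Int) (out : Int) : Decidable (Spec_get_gcd_of_fibonacci n m out) := by unfold Spec_get_gcd_of_fibonacci; infer_instance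

-- ===== CLAIM (what is proved, stated in full; the proofs are below) =====
def Claim_equal_get_gcd_of_fibonacci : Prop := ∀ (n : Int) (m : Int), Dom_get_gcd_of_fibonacci n m → Spec_get_gcd_of_fibonacci n m (get_gcd_of_fibonacci n m)

-- ===== LEMMAS AND PROOFS =====

-- plain integer 2x2 product, power, and the mod-entry version used by A's loop
def pvMmul (x y : (Int × Int) × (Int × Int)) : (Int × Int) × (Int × Int) :=
  ((x.1.1 * y.1.1 + x.1.2 * y.2.1, x.1.1 * y.1.2 + x.1.2 * y.2.2),
   (x.2.1 * y.1.1 + x.2.2 * y.2.1, x.2.1 * y.1.2 + x.2.2 * y.2.2))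

def pvMmodmul (x y : (Int × Int) × (Int × Int)) : (Int × Int) × (Int × Int) :=
  ((PySem.Int.mod (x.1.1 * y.1.1 + x.1.2 * y.2.1) pvMOD,
    PySem.Int.mod (x.1.1 * y.1.2 + x.1.2 * y.2.2) pvMOD),
   (PySem.Int.mod (x.2.1 * y.1.1 + x.2.2 * y.2.1) pvMOD,
    PySem.Int.mod (x.2.1 * y.1.2 + x.2.2 * y.2.2) pvMOD))

def pvMpow (x : (Int × Int) × (Int × Int)) : Nat → (Int × Int) × (Int × Int)
  | 0 => ((1, 0), (0, 1))
  | k + 1 => pvMmul (pvMpow x k) x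

def pvEqv (x y : (Int × Int) × (Int × Int)) : Prop :=
  x.1.1 ≡ y.1.1 [ZMOD pvMOD] ∧ x.1.2 ≡ y.1.2 [ZMOD pvMOD] ∧
  x.2.1 ≡ y.2.1 [ZMOD pvMOD] ∧ x.2.2 ≡ y.2.2 [ZMOD pvMOD]

theorem pvMOD_pos : (0 : Int) < pvMOD := by norm_num [pvMOD]

theorem pvmod_emod (x : Int) : PySem.Int.mod x pvMOD = x % pvMOD :=
  PySem.Int.mod_eq_emod_of_pos pvMOD_pos

theorem pvEqv_refl (x : (Int × Int) × (Int × Int)) : pvEqv x x :=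
  ⟨Int.ModEq.refl _, Int.ModEq.refl _, Int.ModEq.refl _, Int.ModEq.refl _⟩

theorem pvEqv_mmodmul {x X y Y : (Int × Int) × (Int × Int)}
    (hx : pvEqv x X) (hy : pvEqv y Y) : pvEqv (pvMmodmul x y) (pvMmul X Y) := by
  obtain ⟨h1, h2, h3, h4⟩ := hx
  obtain ⟨g1, g2, g3, g4⟩ := hy
  refine ⟨?_, ?_, ?_, ?_⟩ <;>
    simp only [pvMmodmul, pvMmul, pvmod_emod] <;>
    exact Int.ModEq.trans (Int.emod_emod_of_dvd _ dvd_rfl) (by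
      first
      | exact (h1.mul g1).add (h2.mul g3)
      | exact (h1.mul g2).add (h2.mul g4)
      | exact (h3.mul g1).add (h4.mul g3)
      | exact (h3.mul g2).add (h4.mul g4))

theorem pvMmul_assoc (x y z : (Int × Int) × (Int × Int)) :
    pvMmul (pvMmul x y) z = pvMmul x (pvMmul y z) := by
  simp only [pvMmul, Prod.mk.injEq]
  refine ⟨⟨by ring, by ring⟩, by ring, by ring⟩

theorem pvMmul_one (x : (Int × Int) × (Int × Int)) :
    pvMmul x ((1, 0), (0, 1)) = x := by
  obtain ⟨⟨a, b⟩, c, d⟩ := x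
  simp [pvMmul]

theorem pvOne_mmul (x : (Int × Int) × (Int × Int)) :
    pvMmul ((1, 0), (0, 1)) x = x := by
  obtain ⟨⟨a, b⟩, c, d⟩ := x
  simp [pvMmul]

theorem pvMmul_mpow_comm (b : (Int × Int) × (Int × Int)) (n : Nat) :
    pvMmul b (pvMpow b n) = pvMmul (pvMpow b n) b := by
  induction n with
  | zero => rw [pvMpow, pvMmul_one, pvOne_mmul]
  | succ k ih => rw [pvMpow, ← pvMmul_assoc, ih]

theorem pvMpow_two_mul (b : (Int × Int) × (Int × Int)) (q : Nat) :
    pvMpow (pvMmul b b) q = pvMpow b (2 * q) := by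
  induction q with
  | zero => rfl
  | succ k ih =>
      have : 2 * (k + 1) = 2 * k + 1 + 1 := by ring
      rw [pvMpow, ih, this, pvMpow, pvMpow, pvMmul_assoc]

theorem pvFibLoop_inv : ∀ K : Nat, ∀ g : Int, g.toNat = K →
    ∀ ans a A B, pvEqv ans A → pvEqv a B →
    pvEqv (pvFibLoop ans a g) (pvMmul A (pvMpow B K)) := by
  intro K
  induction K using Nat.strong_induction_on with
  | _ K ih =>
    intro g hg ans a A B hA hB
    by_cases hpos : 0 < g
    · rw [pvFibLoop, dif_pos hpos]
      have hfd : PySem.Int.floordiv g 2 = g / 2 :=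
        PySem.Int.floordiv_eq_ediv_of_pos (by norm_num)
      have hm2 : PySem.Int.mod g 2 = g % 2 :=
        PySem.Int.mod_eq_emod_of_pos (by norm_num)
      have hK : 0 < K := by omega
      have hgt : (g / 2).toNat = K / 2 := by omega
      have hlt : K / 2 < K := by omega
      have hBB : pvEqv (pvMmodmul a a) (pvMmul B B) := pvEqv_mmodmul hB hB
      by_cases hodd : PySem.Int.mod g 2 = 1
      · have hKodd : K % 2 = 1 := by rw [hm2] at hodd; omega
        rw [if_pos hodd, hfd]
        have h := ih (K / 2) hlt (g / 2) hgt (pvMmodmul ans a) (pvMmodmul a a)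
          (pvMmul A B) (pvMmul B B) (pvEqv_mmodmul hA hB) hBB
        have heq : pvMmul (pvMmul A B) (pvMpow (pvMmul B B) (K / 2)) =
            pvMmul A (pvMpow B K) := by
          rw [pvMpow_two_mul]
          have hK2 : K = 2 * (K / 2) + 1 := by omega
          conv_rhs => rw [hK2]
          rw [pvMpow, pvMmul_assoc, pvMmul_mpow_comm B (2 * (K / 2))]
        rw [heq] at h
        exact h
      · have hKeven : K % 2 = 0 := by rw [hm2] at hodd; omega
        rw [if_neg hodd, hfd]
        have h := ih (K / 2) hlt (g / 2) hgt ans (pvMmodmul a a) A (pvMmul B B) hA hBB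
        have heq : pvMmul A (pvMpow (pvMmul B B) (K / 2)) = pvMmul A (pvMpow B K) := by
          rw [pvMpow_two_mul]
          have h2 : 2 * (K / 2) = K := by omega
          rw [h2]
        rw [heq] at h
        exact h
    · rw [pvFibLoop, dif_neg hpos]
      have : K = 0 := by omega
      rw [this, pvMpow, pvMmul_one]
      exact hA

-- pvMpow of the Fibonacci matrix
theorem pvMpow_fib (K : Nat) :
    pvMpow ((1, 1), (1, 0)) K =
      (((Nat.fib (K + 1) : Int), (Nat.fib K : Int)),
       ((Nat.fib K : Int), (Nat.fib (K + 1) : Int) - (Nat.fib K : Int))) := by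
  induction K with
  | zero => simp [pvMpow]
  | succ k ih =>
      rw [pvMpow, ih]
      simp only [pvMmul, Prod.mk.injEq]
      have h2 := Nat.fib_add_two (n := k)
      refine ⟨⟨by push_cast [h2]; ring, by push_cast [h2]; ring⟩, by push_cast [h2]; ring,
        by push_cast [h2]; ring⟩

theorem portA_eq (n m : Int) :
    get_gcd_of_fibonacci n m = (Nat.fib (pvGetGcd n m).toNat : Int) % pvMOD := by
  have h := pvFibLoop_inv (pvGetGcd n m).toNat (pvGetGcd n m) rfl
    ((1, 0), (1, 0)) ((1, 1), (1, 0)) ((1, 0), (1, 0)) ((1, 1), (1, 0))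
    (pvEqv_refl _) (pvEqv_refl _)
  obtain ⟨-, h12, -, -⟩ := h
  rw [pvMpow_fib] at h12
  simp only [pvMmul] at h12
  have h12' : (pvFibLoop ((1, 0), (1, 0)) ((1, 1), (1, 0)) (pvGetGcd n m)).1.2 %
      pvMOD = (Nat.fib (pvGetGcd n m).toNat : Int) % pvMOD := by
    have := h12
    simpa using this
  simp only [get_gcd_of_fibonacci, pvmod_emod]
  exact h12'

-- cast forms of the fast-doubling identities
theorem fib_two_mul_int (q : Nat) :
    (Nat.fib (2 * q) : Int) = (Nat.fib q : Int) * (2 * (Nat.fib (q + 1) : Int) - (Nat.fib q : Int)) := by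
  have h := Nat.fib_two_mul q
  have hle : Nat.fib q ≤ 2 * Nat.fib (q + 1) := by
    have h1 := Nat.fib_mono (Nat.le_succ q)
    simp only [Nat.succ_eq_add_one] at h1
    omega
  rw [h, Nat.cast_mul, Nat.cast_sub hle]
  push_cast
  ring

theorem fib_two_mul_add_one_int (q : Nat) :
    (Nat.fib (2 * q + 1) : Int) = (Nat.fib q : Int) * (Nat.fib q : Int) + (Nat.fib (q + 1) : Int) * (Nat.fib (q + 1) : Int) := by
  have h := Nat.fib_two_mul_add_one q
  have := congrArg (Nat.cast : Nat → Int) h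
  push_cast at this
  rw [this]
  ring

theorem pvFibPair_eq (k : Nat) :
    pvFibPair k = ((Nat.fib k : Int) % pvMOD, (Nat.fib (k + 1) : Int) % pvMOD) := by
  induction k using Nat.strong_induction_on with
  | _ k ih =>
    by_cases hk : k = 0
    · subst hk
      rw [pvFibPair]
      norm_num [pvMOD]
    · rw [pvFibPair, dif_neg hk]
      have hq : k / 2 < k := Nat.div_lt_self (Nat.pos_of_ne_zero hk) (by norm_num)
      rw [ih (k / 2) hq]
      set q := k / 2 with hqdef
      simp only [pvmod_emod]
      have hc : ((Nat.fib q : Int) % pvMOD * (2 * ((Nat.fib (q + 1) : Int) % pvMOD) - (Nat.fib q : Int) % pvMOD)) % pvMOD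
          = (Nat.fib (2 * q) : Int) % pvMOD := by
        have : ((Nat.fib q : Int) % pvMOD * (2 * ((Nat.fib (q + 1) : Int) % pvMOD) - (Nat.fib q : Int) % pvMOD))
            ≡ (Nat.fib q : Int) * (2 * (Nat.fib (q + 1) : Int) - (Nat.fib q : Int)) [ZMOD pvMOD] := by
          have ha : (Nat.fib q : Int) % pvMOD ≡ (Nat.fib q : Int) [ZMOD pvMOD] :=
            Int.emod_emod_of_dvd _ dvd_rfl
          have hb : (Nat.fib (q + 1) : Int) % pvMOD ≡ (Nat.fib (q + 1) : Int) [ZMOD pvMOD] :=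
            Int.emod_emod_of_dvd _ dvd_rfl
          exact ha.mul (((Int.ModEq.refl 2).mul hb).sub ha)
        rw [fib_two_mul_int]
        exact this
      have hd : ((Nat.fib q : Int) % pvMOD * ((Nat.fib q : Int) % pvMOD) + (Nat.fib (q + 1) : Int) % pvMOD * ((Nat.fib (q + 1) : Int) % pvMOD)) % pvMOD
          = (Nat.fib (2 * q + 1) : Int) % pvMOD := by
        have ha : (Nat.fib q : Int) % pvMOD ≡ (Nat.fib q : Int) [ZMOD pvMOD] :=
          Int.emod_emod_of_dvd _ dvd_rfl
        have hb : (Nat.fib (q + 1) : Int) % pvMOD ≡ (Nat.fib (q + 1) : Int) [ZMOD pvMOD] :=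
          Int.emod_emod_of_dvd _ dvd_rfl
        rw [fib_two_mul_add_one_int]
        exact (ha.mul ha).add (hb.mul hb)
      by_cases hpar : k % 2 = 0
      · rw [if_pos hpar]
        have hk2 : 2 * q = k := by omega
        rw [hc, hd, hk2]
      · rw [if_neg hpar]
        have hk2 : 2 * q + 1 = k := by omega
        have hsum : ((Nat.fib (2 * q) : Int) % pvMOD + (Nat.fib (2 * q + 1) : Int) % pvMOD) % pvMOD
            = (Nat.fib (k + 1) : Int) % pvMOD := by
          have ha : (Nat.fib (2 * q) : Int) % pvMOD ≡ (Nat.fib (2 * q) : Int) [ZMOD pvMOD] :=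
            Int.emod_emod_of_dvd _ dvd_rfl
          have hb : (Nat.fib (2 * q + 1) : Int) % pvMOD ≡ (Nat.fib (2 * q + 1) : Int) [ZMOD pvMOD] :=
            Int.emod_emod_of_dvd _ dvd_rfl
          have hfib : (Nat.fib (2 * q) : Int) + (Nat.fib (2 * q + 1) : Int) = (Nat.fib (k + 1) : Int) := by
            have : Nat.fib (2 * q) + Nat.fib (2 * q + 1) = Nat.fib (2 * q + 2) := (Nat.fib_add_two).symm
            have hk1 : 2 * q + 2 = k + 1 := by omega
            rw [hk1] at this
            exact_mod_cast this
          calc ((Nat.fib (2 * q) : Int) % pvMOD + (Nat.fib (2 * q + 1) : Int) % pvMOD) % pvMOD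
              = ((Nat.fib (2 * q) : Int) + (Nat.fib (2 * q + 1) : Int)) % pvMOD := ha.add hb
            _ = (Nat.fib (k + 1) : Int) % pvMOD := by rw [hfib]
        rw [hc, hd, hsum, hk2]

theorem portB_eq (n m : Int) :
    get_gcd_of_fibonacci_alt n m = (Nat.fib (pvGetGcd n m).toNat : Int) % pvMOD := by
  simp only [get_gcd_of_fibonacci_alt]
  by_cases hg : pvGetGcd n m ≤ 0
  · rw [if_pos hg]
    have : (pvGetGcd n m).toNat = 0 := by omega
    rw [this]
    norm_num
  · rw [if_neg hg, pvFibPair_eq]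

-- ===== VERDICT (by name: the statement is the Claim_ definition above) =====
theorem get_gcd_of_fibonacci_spec : Claim_equal_get_gcd_of_fibonacci := by
  intro n m _
  unfold Spec_get_gcd_of_fibonacci
  rw [portA_eq, portB_eq]
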